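-- pv_equiv track=rewrite | github.com/alexgreensh/repo-forensics | skills/forensify/orchestrator/scanner_driver.py | cap_findings
-- ===== SOURCE A (Python) =====
-- from typing import Any, Dict, List, Optional
--
-- def cap_findings(
--     findings: List[Dict[str, Any]],
--     max_per_severity: int = 50,
--     max_total: int = 200,
-- ) -> List[Dict[str, Any]]:
--     """
--     Cap findings to stay within token budgets. Preserves severity ordering:
--     CRITICAL > HIGH > MEDIUM > LOW > INFO. Within each severity, preserves
--     first-seen order up to max_per_severity.
--     """
--     severity_order = {"CRITICAL": 0, "HIGH": 1, "MEDIUM": 2, "LOW": 3, "INFO": 4}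
--     findings.sort(key=lambda f: severity_order.get(f.get("severity", "INFO"), 4))
--
--     by_sev: Dict[str, List[Dict[str, Any]]] = {}
--     for f in findings:
--         sev = f.get("severity", "INFO")
--         by_sev.setdefault(sev, []).append(f)
--
--     capped: List[Dict[str, Any]] = []
--     for sev in ["CRITICAL", "HIGH", "MEDIUM", "LOW", "INFO"]:
--         entries = by_sev.get(sev, [])
--         capped.extend(entries[:max_per_severity])
--
--     return capped[:max_total]
-- ===== SOURCE B (Python) =====
-- def cap_findings(findings, max_per_severity=50, max_total=200):
--     # One filter pass per canonical severity, in order; no sort, no grouping dict,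
--     # no buckets: the output is assembled directly as a flat comprehension.
--     out = [f
--            for sev in ("CRITICAL", "HIGH", "MEDIUM", "LOW", "INFO")
--            for f in [g for g in findings
--                      if g.get("severity", "INFO") == sev][:max_per_severity]]
--     return out[:max_total]
-- ===== Notes on version B (the rewrite author's own statement) =====
-- stated objective: alternative
-- what changed: Replaces A's in-place stable sort + dict grouping + canonical-order extraction with five staged filter passes (one per canonical severity, assembled as a flat comprehension) with no sort and no intermediate dict; note A also sorts the input list in place, B leaves it untouched.
import Mathlib
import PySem

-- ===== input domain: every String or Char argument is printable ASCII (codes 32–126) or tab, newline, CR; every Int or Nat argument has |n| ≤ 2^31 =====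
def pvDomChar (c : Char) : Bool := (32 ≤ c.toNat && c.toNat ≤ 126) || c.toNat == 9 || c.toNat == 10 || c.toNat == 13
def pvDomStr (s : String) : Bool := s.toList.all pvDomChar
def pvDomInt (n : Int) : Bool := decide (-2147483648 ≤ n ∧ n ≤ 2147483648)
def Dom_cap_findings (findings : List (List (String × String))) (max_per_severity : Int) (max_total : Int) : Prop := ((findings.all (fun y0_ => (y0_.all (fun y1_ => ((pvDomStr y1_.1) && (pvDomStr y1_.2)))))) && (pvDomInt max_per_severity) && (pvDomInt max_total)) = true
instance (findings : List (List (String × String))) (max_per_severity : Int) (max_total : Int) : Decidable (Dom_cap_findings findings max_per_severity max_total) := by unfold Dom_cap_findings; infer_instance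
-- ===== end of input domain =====

-- B replaces A's sort + dict grouping with five staged filter passes (one per severity);
-- equivalence is about the RETURN value only (A sorts `findings` in place, B does not).

-- f.get("severity", "INFO")  (appears verbatim in both Pythons)
def sevOf (f : List (String × String)) : String := (PySem.Dict.mk f).getD "severity" "INFO"

-- ===== PORT A =====
def sevOrder : PySem.Dict String Int :=
  PySem.Dict.ofList [("CRITICAL", 0), ("HIGH", 1), ("MEDIUM", 2), ("LOW", 3), ("INFO", 4)]

def cap_findings (findings : List (List (String × String))) (max_per_severity : Int) (max_total : Int) : List (List (String × String)) :=
  let sortedF := PySem.List.sorted findings (fun f => sevOrder.getD (sevOf f) 4) false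
  let bySev : PySem.Dict String (List (List (String × String))) :=
    sortedF.foldl (fun d f => d.modify (sevOf f) [] (· ++ [f])) PySem.Dict.empty
  let capped := ["CRITICAL", "HIGH", "MEDIUM", "LOW", "INFO"].foldl
    (fun acc sev => acc ++ PySem.List.slice (bySev.getD sev []) none (some max_per_severity)) []
  PySem.List.slice capped none (some max_total)

-- ===== PORT B =====
def cap_findings_alt (findings : List (List (String × String))) (max_per_severity : Int) (max_total : Int) : List (List (String × String)) :=
  let out := ["CRITICAL", "HIGH", "MEDIUM", "LOW", "INFO"].flatMap
    (fun sev => PySem.List.slice (findings.filter (fun g => sevOf g == sev)) none (some max_per_severity))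
  PySem.List.slice out none (some max_total)

-- ===== PRECONDITION & SPEC =====
def Spec_cap_findings (findings : List (List (String × String))) (max_per_severity : Int) (max_total : Int) (out : List (List (String × String))) : Prop := out = cap_findings_alt findings max_per_severity max_total
instance (findings : List (List (String × String))) (max_per_severity : Int) (max_total : Int) (out : List (List (String × String))) : Decidable (Spec_cap_findings findings max_per_severity max_total out) := by unfold Spec_cap_findings; infer_instance

-- ===== CLAIM (what is proved, stated in full; the proofs are below) =====
def Claim_equal_cap_findings : Prop := ∀ (findings : List (List (String × String))) (max_per_severity : Int) (max_total : Int), Dom_cap_findings findings max_per_severity max_total → Spec_cap_findings findings max_per_severity max_total (cap_findings findings max_per_severity max_total)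

-- ===== LEMMAS AND PROOFS =====

-- filter of a stable insertion (insertBy) into a key-sorted list, when the predicate pins the key
theorem filter_insertBy_of_key {α : Type} {κ : Type} [LinearOrder κ] (key : α → κ) (p : α → Bool)
    (k0 : κ) (hp : ∀ a, p a = true → key a = k0) (x : α) (ys : List α)
    (hys : ys.Pairwise (fun a b => key a ≤ key b)) :
    (PySem.List.insertBy (fun a b => decide (key a < key b)) x ys).filter p
      = if p x then ys.filter p ++ [x] else ys.filter p := by
  induction ys with
  | nil =>
      by_cases hpx : p x = true <;>
        simp [PySem.List.insertBy, hpx]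
  | cons y ys ih =>
      rw [List.pairwise_cons] at hys
      simp only [PySem.List.insertBy]
      by_cases hlt : key x < key y
      · rw [if_pos (by simp [hlt])]
        by_cases hpx : p x = true
        · have hk0 : key x = k0 := hp x hpx
          have hnone : (y :: ys).filter p = [] := by
            rw [List.filter_eq_nil_iff]
            intro a ha hpa
            have hka := hp a hpa
            rcases List.mem_cons.mp ha with hb | hb
            · subst hb; rw [hka, ← hk0] at hlt; exact lt_irrefl _ hlt
            · have hle := hys.1 a hb
              rw [hka] at hle
              rw [hk0] at hlt
              exact absurd (lt_of_lt_of_le hlt hle) (lt_irrefl _)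
          rw [List.filter_cons_of_pos hpx, hnone, if_pos hpx]
          simp
        · rw [List.filter_cons_of_neg (by simp [hpx]), if_neg (by simp [hpx])]
      · rw [if_neg (by simp [hlt])]
        rw [List.filter_cons, List.filter_cons, ih hys.2]
        by_cases hpy : p y = true <;> by_cases hpx : p x = true <;> simp [hpy, hpx]

-- filter of A's stable sort equals filter of the original list (predicate pins the key)
theorem filter_sorted_of_key {α : Type} {κ : Type} [LinearOrder κ] (key : α → κ) (p : α → Bool)
    (k0 : κ) (hp : ∀ a, p a = true → key a = k0) (xs : List α) :
    (PySem.List.sorted xs key false).filter p = xs.filter p := by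
  induction xs using List.reverseRecOn with
  | nil => simp [PySem.List.sorted]
  | append_singleton xs x ih =>
      rw [PySem.List.sorted_eq_foldl_insertBy, List.foldl_append, List.foldl_cons, List.foldl_nil,
          ← PySem.List.sorted_eq_foldl_insertBy]
      rw [filter_insertBy_of_key key p k0 hp x _ (PySem.List.sorted_pairwise xs key)]
      rw [ih, List.filter_append]
      by_cases hpx : p x = true <;> simp [hpx]

-- A's grouped dict looked up at severity s is the filter of the sorted list
theorem bySev_getD (xs : List (List (String × String))) (s : String) :
    ((xs.foldl (fun d f => d.modify (sevOf f) [] (· ++ [f])) PySem.Dict.empty).getD s [])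
      = xs.filter (fun f => sevOf f == s) := by
  have hmap : xs.foldl (fun d f => d.modify (sevOf f) [] (· ++ [f])) PySem.Dict.empty
      = (xs.map (fun f => (sevOf f, f))).foldl (fun d p => d.modify p.1 [] (· ++ [p.2])) PySem.Dict.empty := by
    rw [List.foldl_map]
  rw [hmap, PySem.Dict.getD_foldl_modify_append]
  simp [List.filter_map, Function.comp_def]

theorem filter_sev (findings : List (List (String × String))) (s : String) (k0 : Int)
    (hk : sevOrder.getD s 4 = k0) :
    (PySem.List.sorted findings (fun f => sevOrder.getD (sevOf f) 4) false).filter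
        (fun f => sevOf f == s)
      = findings.filter (fun f => sevOf f == s) := by
  apply filter_sorted_of_key (fun f => sevOrder.getD (sevOf f) 4) _ k0
  intro a ha
  have hs : sevOf a = s := by simpa using ha
  rw [hs, hk]

-- ===== VERDICT (by name: the statement is the Claim_ definition above) =====
theorem cap_findings_spec : Claim_equal_cap_findings := by
  intro findings mps mt _
  unfold Spec_cap_findings cap_findings cap_findings_alt
  simp only [List.foldl_cons, List.foldl_nil, List.flatMap_cons, List.flatMap_nil,
    bySev_getD, List.nil_append, List.append_nil, List.append_assoc]
  rw [filter_sev findings "CRITICAL" 0 (by decide), filter_sev findings "HIGH" 1 (by decide),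
      filter_sev findings "MEDIUM" 2 (by decide), filter_sev findings "LOW" 3 (by decide),
      filter_sev findings "INFO" 4 (by decide)]
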